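-- pv_equiv track=rewrite | github.com/Jacfogel/MHM | ai_development_tools/generate_module_dependencies.py | identify_modules_needing_enhancement
-- ===== SOURCE A (Python) =====
-- from typing import Dict, List, Any
--
-- def identify_modules_needing_enhancement(existing_content: str, actual_imports: Dict[str, Dict]) -> Dict[str, str]:
--     """Identify modules that need manual enhancements or updates."""
--     enhancement_status = {}
--
--     # Parse existing manual enhancements
--     existing_enhancements = {}
--     if existing_content:
--         sections = {}
--         current_section = None
--         current_content = []
--
--         for line in existing_content.split('\n'):
--             # Look for module headers in both formats:
--             # 1. "#### `module_name.py`" (with #### prefix)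
--             # 2. "module_name.py" (without #### prefix)
--             if (line.startswith('#### `') and line.endswith('`') and '.py`' in line):
--                 # Format: "#### `module_name.py`"
--                 if current_section:
--                     sections[current_section] = '\n'.join(current_content)
--
--                 current_section = line[6:-1]  # Remove "#### `" and "`"
--                 current_content = [line]
--             elif (line.strip().endswith('.py') and
--                   not line.startswith('-') and
--                   not line.startswith('**') and
--                   '/' in line):
--                 # Format: "module_name.py" (legacy format)
--                 if current_section:
--                     sections[current_section] = '\n'.join(current_content)
--
--                 current_section = line.strip()
--                 current_content = [line]
--             elif current_section:
--                 current_content.append(line)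
--
--         if current_section:
--             sections[current_section] = '\n'.join(current_content)
--
--         # Extract manual enhancements
--         for section_name, section_content in sections.items():
--             start_marker = "<!-- MANUAL_ENHANCEMENT_START -->"
--             end_marker = "<!-- MANUAL_ENHANCEMENT_END -->"
--
--             start_pos = section_content.find(start_marker)
--             end_pos = section_content.find(end_marker)
--
--             if start_pos != -1 and end_pos != -1:
--                 manual_content = section_content[start_pos:end_pos + len(end_marker)]
--                 # Check if it's just the placeholder
--                 if "Add any additional context" in manual_content and "Enhanced Purpose" not in manual_content:
--                     existing_enhancements[section_name] = "placeholder"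
--                 else:
--                     existing_enhancements[section_name] = "enhanced"
--             else:
--                 existing_enhancements[section_name] = "missing"
--
--     # Analyze each module
--     for file_path, data in actual_imports.items():
--         section_name = file_path  # Use file_path directly as section name
--
--         if section_name not in existing_enhancements:
--             enhancement_status[file_path] = "new_module"
--         elif existing_enhancements[section_name] == "placeholder":
--             enhancement_status[file_path] = "needs_enhancement"
--         elif existing_enhancements[section_name] == "enhanced":
--             # Check if dependencies have changed significantly
--             # For now, just mark as up_to_date since we're preserving manual enhancements
--             # The dependency comparison logic needs to be fixed to compare the same type of dependencies
--             enhancement_status[file_path] = "up_to_date"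
--         else:
--             enhancement_status[file_path] = "missing_enhancement"
--
--     return enhancement_status
-- ===== SOURCE B (Python) =====
-- def identify_modules_needing_enhancement(existing_content: str, actual_imports):
--     """Reverse-scan variant: walk the lines back to front so every header already has its
--     complete section text at hand; the first classification recorded for a name (i.e. the
--     last section in document order) wins, matching dict overwrite semantics."""
--     START = "<!-- MANUAL_ENHANCEMENT_START -->"
--     END = "<!-- MANUAL_ENHANCEMENT_END -->"
--     STATUS = {"placeholder": "needs_enhancement", "enhanced": "up_to_date"}
--
--     existing = {}
--     tail = []  # the lines between the current position and the next header below it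
--     for line in reversed(existing_content.split('\n')):
--         if line.startswith('#### `') and line.endswith('`') and '.py`' in line:
--             name = line[6:-1]
--         elif (line.strip().endswith('.py') and not line.startswith('-')
--               and not line.startswith('**') and '/' in line):
--             name = line.strip()
--         else:
--             tail = [line] + tail
--             continue
--         if name not in existing:
--             section = '\n'.join([line] + tail)
--             s, e = section.find(START), section.find(END)
--             if s == -1 or e == -1:
--                 existing[name] = "missing"
--             else:
--                 manual = section[s:e + len(END)]
--                 existing[name] = ("placeholder"
--                                   if "Add any additional context" in manual
--                                      and "Enhanced Purpose" not in manual
--                                   else "enhanced")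
--         tail = []
--
--     return {fp: ("new_module" if fp not in existing
--                  else STATUS.get(existing[fp], "missing_enhancement"))
--             for fp in actual_imports}
-- ===== Notes on version B (the rewrite author's own statement) =====
-- stated objective: alternative
-- what changed: B scans the lines BACK TO FRONT with a suffix buffer: at each header the complete section text is already in hand, is classified immediately, and the first classification seen per name (the last section in document order) is kept via keep-first insertion, so A's forward state machine, its intermediate sections dict and its separate extraction pass all disappear; the final statuses come from a lookup table instead of A's if/elif chain.
import Mathlib
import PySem

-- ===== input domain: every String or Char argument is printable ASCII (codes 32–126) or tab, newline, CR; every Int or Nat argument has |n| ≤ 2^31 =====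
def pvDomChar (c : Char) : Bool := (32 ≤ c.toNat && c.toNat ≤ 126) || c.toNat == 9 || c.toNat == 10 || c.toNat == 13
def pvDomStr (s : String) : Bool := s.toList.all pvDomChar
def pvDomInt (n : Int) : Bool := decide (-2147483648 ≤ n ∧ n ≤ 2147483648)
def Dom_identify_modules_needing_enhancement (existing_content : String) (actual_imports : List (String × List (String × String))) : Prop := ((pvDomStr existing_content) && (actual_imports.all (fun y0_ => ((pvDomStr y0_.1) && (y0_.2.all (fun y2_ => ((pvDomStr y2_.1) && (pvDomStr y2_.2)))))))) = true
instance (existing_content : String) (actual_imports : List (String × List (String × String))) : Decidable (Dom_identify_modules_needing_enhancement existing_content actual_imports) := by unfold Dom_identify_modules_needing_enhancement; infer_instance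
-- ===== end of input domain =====

-- B replaces A's forward two-phase pipeline (state machine building a sections index, then a
-- second pass classifying each indexed section) by one reverse scan that classifies each section
-- the moment its header is reached, keeping the first classification per name (objective: alternative).

-- ===== PORT A =====
-- the two header tests of A's parsing loop
def pvIsHdr1 (line : List Char) : Bool :=
  PySem.Chars.startswith line "#### `".toList && PySem.Chars.endswith line "`".toList &&
  PySem.Chars.isIn ".py`".toList line

def pvHdr1Name (line : List Char) : List Char := PySem.List.slice line (some 6) (some (-1))

def pvIsHdr2 (line : List Char) : Bool :=
  PySem.Chars.endswith (PySem.Chars.strip line) ".py".toList &&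
  !PySem.Chars.startswith line "-".toList &&
  !PySem.Chars.startswith line "**".toList &&
  PySem.Chars.isIn "/".toList line

-- A's marker / placeholder classification of one section's full text (body of its extraction loop)
def pvClassify (content : List Char) : String :=
  let startMarker : List Char := "<!-- MANUAL_ENHANCEMENT_START -->".toList
  let endMarker : List Char := "<!-- MANUAL_ENHANCEMENT_END -->".toList
  let startPos := PySem.Chars.find content startMarker
  let endPos := PySem.Chars.find content endMarker
  if startPos ≠ -1 ∧ endPos ≠ -1 then
    let manual := PySem.List.slice content (some startPos) (some (endPos + (endMarker.length : Int)))
    if PySem.Chars.isIn "Add any additional context".toList manual = true ∧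
       PySem.Chars.isIn "Enhanced Purpose".toList manual = false then "placeholder" else "enhanced"
  else "missing"

-- Python truthiness of `current_section` (None or a str)
def pvTruthy (cur : Option (List Char)) : Bool :=
  match cur with | none => false | some s => !s.isEmpty

-- `if current_section: sections[current_section] = '\n'.join(current_content)`
def pvFlushA (secs : PySem.Dict (List Char) (List Char)) (cur : Option (List Char))
    (buf : List (List Char)) : PySem.Dict (List Char) (List Char) :=
  match cur with
  | some s => if s.isEmpty then secs else secs.insert s (PySem.Chars.join ['\n'] buf)
  | none => secs

-- one iteration of A's parsing loop; state = (sections, current_section, current_content)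
def pvStepA (st : PySem.Dict (List Char) (List Char) × Option (List Char) × List (List Char))
    (line : List Char) :
    PySem.Dict (List Char) (List Char) × Option (List Char) × List (List Char) :=
  if pvIsHdr1 line then
    (pvFlushA st.1 st.2.1 st.2.2, some (pvHdr1Name line), [line])
  else if pvIsHdr2 line then
    (pvFlushA st.1 st.2.1 st.2.2, some (PySem.Chars.strip line), [line])
  else if pvTruthy st.2.1 then (st.1, st.2.1, st.2.2 ++ [line])
  else st

def identify_modules_needing_enhancement (existing_content : String) (actual_imports : List (String × List (String × String))) : List (String × String) :=
  -- existing_enhancements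
  let existing : PySem.Dict (List Char) String :=
    if existing_content.toList = [] then PySem.Dict.empty
    else
      let fin := (PySem.Chars.splitOn existing_content.toList ['\n']).foldl pvStepA
        (PySem.Dict.empty, none, [])
      let secs := pvFlushA fin.1 fin.2.1 fin.2.2
      -- extraction pass over sections.items()
      secs.items.foldl (fun d p => d.insert p.1 (pvClassify p.2)) PySem.Dict.empty
  -- analysis loop over actual_imports.items() (the dict the Python receives)
  let d := PySem.Dict.ofList actual_imports
  (d.items.foldl (fun st p =>
      if existing.contains p.1.toList = false then st.insert p.1 "new_module"
      -- `existing_enhancements[section_name]`: contains holds here, so get? is some; getD "" is that value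
      else if ((existing.get? p.1.toList).getD "") == "placeholder" then st.insert p.1 "needs_enhancement"
      else if ((existing.get? p.1.toList).getD "") == "enhanced" then st.insert p.1 "up_to_date"
      else st.insert p.1 "missing_enhancement")
    PySem.Dict.empty).items

-- ===== PORT B =====
-- B's inline classification of a completed section (find both markers; missing-first order)
def pvClassifyB (section_ : List Char) : String :=
  let endM : List Char := "<!-- MANUAL_ENHANCEMENT_END -->".toList
  let s := PySem.Chars.find section_ "<!-- MANUAL_ENHANCEMENT_START -->".toList
  let e := PySem.Chars.find section_ endM
  if s = -1 ∨ e = -1 then "missing"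
  else
    let manual := PySem.List.slice section_ (some s) (some (e + (endM.length : Int)))
    if PySem.Chars.isIn "Add any additional context".toList manual = true ∧
       PySem.Chars.isIn "Enhanced Purpose".toList manual = false then "placeholder" else "enhanced"

-- `if name not in existing: existing[name] = classify('\n'.join([line] + tail)); tail = []`
def pvRecB (st : PySem.Dict (List Char) String × List (List Char)) (name line : List Char) :
    PySem.Dict (List Char) String × List (List Char) :=
  (if st.1.contains name then st.1
   else st.1.insert name (pvClassifyB (PySem.Chars.join ['\n'] (line :: st.2))), [])

-- one iteration of B's reverse loop; state = (existing, tail)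
def pvStepBr (st : PySem.Dict (List Char) String × List (List Char)) (line : List Char) :
    PySem.Dict (List Char) String × List (List Char) :=
  if pvIsHdr1 line then pvRecB st (pvHdr1Name line) line
  else if pvIsHdr2 line then pvRecB st (PySem.Chars.strip line) line
  else (st.1, line :: st.2)

-- STATUS = {"placeholder": "needs_enhancement", "enhanced": "up_to_date"}
def pvStatusTable : PySem.Dict String String :=
  PySem.Dict.ofList [("placeholder", "needs_enhancement"), ("enhanced", "up_to_date")]

def identify_modules_needing_enhancement_alt (existing_content : String) (actual_imports : List (String × List (String × String))) : List (String × String) :=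
  let fin := (PySem.Chars.splitOn existing_content.toList ['\n']).reverse.foldl pvStepBr
    (PySem.Dict.empty, [])
  let ex := fin.1
  (PySem.Dict.ofList actual_imports).keys.map (fun fp =>
    (fp, match ex.get? fp.toList with
         | none => "new_module"
         | some st => (pvStatusTable.get? st).getD "missing_enhancement"))

-- ===== PRECONDITION & SPEC =====
def Spec_identify_modules_needing_enhancement (existing_content : String) (actual_imports : List (String × List (String × String))) (out : List (String × String)) : Prop := out = identify_modules_needing_enhancement_alt existing_content actual_imports
instance (existing_content : String) (actual_imports : List (String × List (String × String))) (out : List (String × String)) : Decidable (Spec_identify_modules_needing_enhancement existing_content actual_imports out) := by unfold Spec_identify_modules_needing_enhancement; infer_instance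

-- ===== CLAIM (what is proved, stated in full; the proofs are below) =====
def Claim_equal_identify_modules_needing_enhancement : Prop := ∀ (existing_content : String) (actual_imports : List (String × List (String × String))), Dom_identify_modules_needing_enhancement existing_content actual_imports → Spec_identify_modules_needing_enhancement existing_content actual_imports (identify_modules_needing_enhancement existing_content actual_imports)

-- ===== LEMMAS AND PROOFS =====

-- header detection, shared shape of both loops (proof-only)
def pvHd (l : List Char) : Option (List Char) :=
  if pvIsHdr1 l then some (pvHdr1Name l)
  else if pvIsHdr2 l then some (PySem.Chars.strip l) else none

-- the lines before the first header
def pvPre (lines : List (List Char)) : List (List Char) :=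
  lines.takeWhile (fun l => (pvHd l).isNone)

-- the forward sequence of (section name, section text) pairs, duplicates kept
def pvSecs : List (List Char) → Option (List Char × List (List Char)) → List (List Char × List Char)
  | [], none => []
  | [], some (s, buf) => [(s, PySem.Chars.join ['\n'] buf)]
  | l :: t, st =>
    match pvHd l with
    | some h =>
      (match st with
       | none => ([] : List (List Char × List Char))
       | some (s, buf) => [(s, PySem.Chars.join ['\n'] buf)]) ++ pvSecs t (some (h, [l]))
    | none =>
      match st with
      | some (s, buf) => pvSecs t (some (s, buf ++ [l]))
      | none => pvSecs t none

-- the pending section flushed as a (name, text) list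
def pvFlushL (st : Option (List Char × List (List Char))) : List (List Char × List Char) :=
  match st with
  | none => []
  | some (s, buf) => [(s, PySem.Chars.join ['\n'] buf)]

theorem pvSecs_cons_hd (l : List Char) (t : List (List Char)) (hn : List Char)
    (st : Option (List Char × List (List Char))) (h : pvHd l = some hn) :
    pvSecs (l :: t) st = pvFlushL st ++ pvSecs t (some (hn, [l])) := by
  cases st with
  | none => simp [pvSecs, pvFlushL, h]
  | some p => cases p with | mk s buf => simp [pvSecs, pvFlushL, h]

theorem pvSecs_cons_nohd_some (l : List Char) (t : List (List Char)) (s : List Char)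
    (buf : List (List Char)) (h : pvHd l = none) :
    pvSecs (l :: t) (some (s, buf)) = pvSecs t (some (s, buf ++ [l])) := by
  simp [pvSecs, h]

theorem pvSecs_cons_nohd_none (l : List Char) (t : List (List Char)) (h : pvHd l = none) :
    pvSecs (l :: t) none = pvSecs t none := by
  simp [pvSecs, h]

-- value of the LAST pair with a given key
def pvLookLast {ν : Type} (l : List (List Char × ν)) (k : List Char) : Option ν :=
  l.foldl (fun acc p => if p.1 == k then some p.2 else acc) none

theorem pvClassifyB_eq (c : List Char) : pvClassifyB c = pvClassify c := by
  unfold pvClassify pvClassifyB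
  dsimp only
  generalize PySem.Chars.find c "<!-- MANUAL_ENHANCEMENT_START -->".toList = s
  generalize PySem.Chars.find c "<!-- MANUAL_ENHANCEMENT_END -->".toList = e
  by_cases h1 : s = -1 <;> by_cases h2 : e = -1 <;> simp [h1, h2]

theorem pvLook_foldl {ν : Type} (k : List Char) (l : List (List Char × ν))
    (acc : Option ν) :
    l.foldl (fun a p => if p.1 == k then some p.2 else a) acc
      = (pvLookLast l k).or acc := by
  induction l generalizing acc with
  | nil => simp [pvLookLast]
  | cons p t ih =>
    show t.foldl _ (if p.1 == k then some p.2 else acc) = (pvLookLast (p :: t) k).or acc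
    rw [ih]
    have : pvLookLast (p :: t) k
        = t.foldl (fun a q => if q.1 == k then some q.2 else a) (if p.1 == k then some p.2 else none) := rfl
    rw [this, ih]
    cases pvLookLast t k <;> cases hb : p.1 == k <;> simp_all

theorem pvLookLast_cons {ν : Type} (p : List Char × ν) (t : List (List Char × ν)) (k : List Char) :
    pvLookLast (p :: t) k = (pvLookLast t k).or (if p.1 == k then some p.2 else none) := by
  show t.foldl _ (if p.1 == k then some p.2 else none) = _
  exact pvLook_foldl k t _

theorem pvGet_foldl_insert {ν : Type} (l : List (List Char × ν))
    (d : PySem.Dict (List Char) ν) (k : List Char) :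
    ((l.foldl (fun dd p => dd.insert p.1 p.2) d).get? k)
      = (pvLookLast l k).or (d.get? k) := by
  induction l generalizing d with
  | nil => simp [pvLookLast]
  | cons p t ih =>
    rw [List.foldl_cons, ih, pvLookLast_cons, PySem.Dict.get?_insert]
    cases h : pvLookLast t k with
    | some v => simp [Option.or]
    | none =>
      by_cases he : k = p.1
      · subst he; simp [Option.or]
      · have hb : (p.1 == k) = false := beq_eq_false_iff_ne.2 fun hh => he hh.symm
        simp [he, hb, Option.or]

-- the name produced by a header line is never empty
theorem pvHdr1Name_ne_nil (line : List Char) (h : pvIsHdr1 line = true) :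
    pvHdr1Name line ≠ [] := by
  unfold pvIsHdr1 at h
  simp only [Bool.and_eq_true] at h
  obtain ⟨⟨h1, h2⟩, h3⟩ := h
  rw [PySem.Chars.startswith_iff] at h1
  rw [PySem.Chars.endswith_iff] at h2
  rw [PySem.Chars.isIn_iff_infix] at h3
  obtain ⟨t, ht⟩ := h1
  have hdot : '.' ∈ t := by
    have hm : '.' ∈ line := h3.subset (by decide)
    rw [← ht] at hm
    rcases List.mem_append.1 hm with hm | hm
    · exact absurd hm (by decide)
    · exact hm
  have hlast : line.getLast? = some '`' := by
    obtain ⟨p, hp⟩ := h2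
    rw [← hp]
    simp
  have ht2 : 2 ≤ t.length := by
    match t, hdot with
    | [c], hdot =>
      have hc : '.' = c := by simpa using hdot
      rw [← ht, ← hc] at hlast
      exact absurd hlast (by decide)
    | c :: d :: u, _ => simp
  have hlen : line.length = 6 + t.length := by
    rw [← ht]; simp; omega
  intro hn
  have hle := congrArg List.length hn
  simp only [pvHdr1Name, PySem.List.slice, PySem.List.clampIdx, List.length_take,
    List.length_drop, List.length_nil] at hle
  split_ifs at hle <;> omega

theorem pvStrip_ne_nil (line : List Char) (h : pvIsHdr2 line = true) :
    PySem.Chars.strip line ≠ [] := by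
  unfold pvIsHdr2 at h
  simp only [Bool.and_eq_true] at h
  have h1 := h.1.1.1
  rw [PySem.Chars.endswith_iff] at h1
  intro hn
  rw [hn, List.suffix_nil] at h1
  simp at h1

-- A's parse loop flushes exactly the pvSecs pairs, in order, as dict inserts
theorem pvA_fold (lines : List (List Char)) :
    ∀ (d : PySem.Dict (List Char) (List Char)) (cur : Option (List Char)) (buf : List (List Char)),
    (∀ s, cur = some s → s ≠ []) →
    pvFlushA (lines.foldl pvStepA (d, cur, buf)).1 (lines.foldl pvStepA (d, cur, buf)).2.1
        (lines.foldl pvStepA (d, cur, buf)).2.2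
      = (pvSecs lines (cur.map (fun s => (s, buf)))).foldl (fun dd p => dd.insert p.1 p.2) d := by
  induction lines with
  | nil =>
    intro d cur buf hinv
    cases cur with
    | none => rfl
    | some s =>
      have hs : s.isEmpty = false := by
        cases s with
        | nil => exact absurd rfl (hinv _ rfl)
        | cons c cs => rfl
      simp [pvSecs, pvFlushA, hs]
  | cons l t ih =>
    intro d cur buf hinv
    have hflush : pvFlushA d cur buf
        = (pvFlushL (cur.map (fun s => (s, buf)))).foldl (fun dd p => dd.insert p.1 p.2) d := by
      cases cur with
      | none => rfl
      | some s =>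
        have hs : s.isEmpty = false := by
          cases s with
          | nil => exact absurd rfl (hinv _ rfl)
          | cons c cs => rfl
        simp [pvFlushA, pvFlushL, hs]
    by_cases h1 : pvIsHdr1 l = true
    · have hstep : pvStepA (d, cur, buf) l = (pvFlushA d cur buf, some (pvHdr1Name l), [l]) := by
        simp [pvStepA, h1]
      rw [List.foldl_cons, hstep,
        ih _ _ _ (fun s hs => by cases hs; exact pvHdr1Name_ne_nil l h1),
        pvSecs_cons_hd l t (pvHdr1Name l) _ (by simp [pvHd, h1]),
        List.foldl_append, ← hflush]
      simp
    · by_cases h2 : pvIsHdr2 l = true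
      · have hstep : pvStepA (d, cur, buf) l = (pvFlushA d cur buf, some (PySem.Chars.strip l), [l]) := by
          simp [pvStepA, h1, h2]
        rw [List.foldl_cons, hstep,
          ih _ _ _ (fun s hs => by cases hs; exact pvStrip_ne_nil l h2),
          pvSecs_cons_hd l t (PySem.Chars.strip l) _ (by simp [pvHd, h1, h2]),
          List.foldl_append, ← hflush]
        simp
      · have hhd : pvHd l = none := by simp [pvHd, h1, h2]
        cases cur with
        | none =>
          have hstep : pvStepA (d, none, buf) l = (d, none, buf) := by
            simp [pvStepA, h1, h2, pvTruthy]
          rw [List.foldl_cons, hstep, ih _ _ _ (fun s hs => by cases hs)]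
          simp [pvSecs_cons_nohd_none l t hhd]
        | some s =>
          have hs : s ≠ [] := hinv s rfl
          have htr : pvTruthy (some s) = true := by
            cases s with
            | nil => exact absurd rfl hs
            | cons c cs => rfl
          have hstep : pvStepA (d, some s, buf) l = (d, some s, buf ++ [l]) := by
            simp [pvStepA, h1, h2, htr]
          rw [List.foldl_cons, hstep, ih _ _ _ (fun s' hs' => by cases hs'; exact hs)]
          simp [pvSecs_cons_nohd_some l t s buf hhd]

-- Lemma C: a running section absorbs the header-free prefix, then pvSecs restarts
theorem pvSecs_some (t : List (List Char)) :
    ∀ (s : List Char) (buf : List (List Char)),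
    pvSecs t (some (s, buf))
      = (s, PySem.Chars.join ['\n'] (buf ++ pvPre t)) :: pvSecs t none := by
  induction t with
  | nil => intro s buf; simp [pvSecs, pvPre]
  | cons l t ih =>
    intro s buf
    cases h : pvHd l with
    | some hname =>
      rw [pvSecs_cons_hd l t hname _ h, pvSecs_cons_hd l t hname none h]
      have hpre : pvPre (l :: t) = [] := by simp [pvPre, h]
      simp [pvFlushL, hpre]
    | none =>
      rw [pvSecs_cons_nohd_some l t s buf h, ih, pvSecs_cons_nohd_none l t h]
      have hpre : pvPre (l :: t) = l :: pvPre t := by simp [pvPre, h]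
      simp [hpre]

theorem pvStepBr_hd (st : PySem.Dict (List Char) String × List (List Char)) (l : List Char) :
    pvStepBr st l
      = match pvHd l with
        | some h => pvRecB st h l
        | none => (st.1, l :: st.2) := by
  unfold pvStepBr pvHd
  split_ifs <;> rfl

-- B's reverse fold computes the classification of the LAST section of each name
theorem pvB_fold (lines : List (List Char)) :
    (∀ k, ((lines.foldr (fun l st => pvStepBr st l)
        ((PySem.Dict.empty : PySem.Dict (List Char) String), ([] : List (List Char))))).1.get? k
      = (pvLookLast (pvSecs lines none) k).map pvClassifyB)
    ∧ (lines.foldr (fun l st => pvStepBr st l)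
        ((PySem.Dict.empty : PySem.Dict (List Char) String), ([] : List (List Char)))).2
      = pvPre lines := by
  induction lines with
  | nil => exact ⟨fun k => by simp [pvSecs, pvLookLast, PySem.Dict.get?_empty], rfl⟩
  | cons l t ih =>
    obtain ⟨ih1, ih2⟩ := ih
    rw [List.foldr_cons, pvStepBr_hd]
    cases h : pvHd l with
    | none =>
      constructor
      · intro k
        have hsecs : pvSecs (l :: t) none = pvSecs t none := by simp [pvSecs, h]
        simpa [hsecs] using ih1 k
      · simp [pvPre, h, ih2]
    | some hname =>
      set P := t.foldr (fun l st => pvStepBr st l)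
        ((PySem.Dict.empty : PySem.Dict (List Char) String), ([] : List (List Char))) with hP
      have hsecs : pvSecs (l :: t) none
          = (hname, PySem.Chars.join ['\n'] (l :: pvPre t)) :: pvSecs t none := by
        have h0 : pvSecs (l :: t) none = [] ++ pvSecs t (some (hname, [l])) := by
          simp [pvSecs, h]
        rw [h0, List.nil_append, pvSecs_some]
        simp
      constructor
      · intro k
        rw [hsecs, pvLookLast_cons]
        show (if P.1.contains hname then P.1
              else P.1.insert hname (pvClassifyB (PySem.Chars.join ['\n'] (l :: P.2)))).get? k = _
        rw [ih2]
        by_cases hc : P.1.contains hname = true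
        · have hlook : pvLookLast (pvSecs t none) hname ≠ none := by
            intro hn
            have h0 := ih1 hname
            rw [hn, Option.map_none] at h0
            rw [PySem.Dict.get?_eq_none_iff_contains _ _] at h0
            rw [h0] at hc
            exact Bool.noConfusion hc
          rw [if_pos hc, ih1 k]
          by_cases hk : (hname == k) = true
          · have hkk : k = hname := (eq_of_beq hk).symm
            subst hkk
            obtain ⟨v, hv⟩ := Option.ne_none_iff_exists'.1 hlook
            simp [hv]
          · simp [hk]
        · have hlooknone : pvLookLast (pvSecs t none) hname = none := by
            have h0 := ih1 hname
            rw [(PySem.Dict.get?_eq_none_iff_contains _ _).2 (Bool.eq_false_iff.2 hc)] at h0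
            exact (Option.map_eq_none_iff).1 h0.symm
          rw [if_neg hc, PySem.Dict.get?_insert]
          by_cases hk : k = hname
          · subst hk
            simp [hlooknone]
          · have hbk : (hname == k) = false := by
              simp [beq_eq_false_iff_ne]
              exact fun he => hk he.symm
            rw [if_neg hk, ih1 k, hbk]
            simp
      · show ([] : List (List Char)) = pvPre (l :: t)
        simp [pvPre, h]

-- get? through a value-mapped literal dict
theorem pvGet_mk_map {ν μ : Type} (l : List (List Char × ν)) (f : ν → μ) (k : List Char) :
    (PySem.Dict.mk (l.map (fun p => (p.1, f p.2)))).get? k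
      = ((PySem.Dict.mk l).get? k).map f := by
  induction l with
  | nil => simp [PySem.Dict.get?]
  | cons p t ih =>
    obtain ⟨a, v⟩ := p
    simp only [List.map_cons]
    rw [PySem.Dict.get?_mk_cons, PySem.Dict.get?_mk_cons]
    by_cases h : (a == k) = true <;> simp [h, ih]

-- the status table read back as A's if/elif chain
theorem pvStatusTable_get (st : String) :
    (pvStatusTable.get? st).getD "missing_enhancement"
      = (if st == "placeholder" then "needs_enhancement"
         else if st == "enhanced" then "up_to_date"
         else "missing_enhancement") := by
  have h : pvStatusTable
      = PySem.Dict.mk [("placeholder", "needs_enhancement"), ("enhanced", "up_to_date")] := by rfl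
  rw [h, PySem.Dict.get?_mk_cons, PySem.Dict.get?_mk_cons]
  by_cases h1 : st = "placeholder"
  · subst h1; decide
  · by_cases h2 : st = "enhanced"
    · subst h2; decide
    · have b1 : ("placeholder" == st) = false := beq_eq_false_iff_ne.2 fun e => h1 e.symm
      have b2 : ("enhanced" == st) = false := beq_eq_false_iff_ne.2 fun e => h2 e.symm
      have b1' : (st == "placeholder") = false := beq_eq_false_iff_ne.2 h1
      have b2' : (st == "enhanced") = false := beq_eq_false_iff_ne.2 h2
      have hemp : (PySem.Dict.mk ([] : List (String × String))).get? st = none := rfl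
      rw [b1, b2, b1', b2']
      simp [hemp]

-- A's status for one module, as a function of the existing-enhancements lookup
def pvG (ex : PySem.Dict (List Char) String) (fp : String) : String :=
  match ex.get? fp.toList with
  | none => "new_module"
  | some st =>
    if st == "placeholder" then "needs_enhancement"
    else if st == "enhanced" then "up_to_date"
    else "missing_enhancement"

-- A's analysis loop produces the pvG statuses in actual-imports order
theorem pvStatus_eq (ex : PySem.Dict (List Char) String)
    (l : List (String × List (String × String))) (h : (l.map Prod.fst).Nodup) :
    (l.foldl (fun st p =>
      if ex.contains p.1.toList = false then st.insert p.1 "new_module"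
      else if ((ex.get? p.1.toList).getD "") == "placeholder" then st.insert p.1 "needs_enhancement"
      else if ((ex.get? p.1.toList).getD "") == "enhanced" then st.insert p.1 "up_to_date"
      else st.insert p.1 "missing_enhancement") PySem.Dict.empty).items
    = l.map (fun p => (p.1, pvG ex p.1)) := by
  have hstep : (fun (st : PySem.Dict String String) (p : String × List (String × String)) =>
      if ex.contains p.1.toList = false then st.insert p.1 "new_module"
      else if ((ex.get? p.1.toList).getD "") == "placeholder" then st.insert p.1 "needs_enhancement"
      else if ((ex.get? p.1.toList).getD "") == "enhanced" then st.insert p.1 "up_to_date"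
      else st.insert p.1 "missing_enhancement")
      = fun st p => st.insert p.1 (pvG ex p.1) := by
    funext st p
    by_cases h1 : ex.contains p.1.toList = false
    · have hn : ex.get? p.1.toList = none := (PySem.Dict.get?_eq_none_iff_contains _ _).2 h1
      simp [h1, pvG, hn]
    · have hsome : ex.get? p.1.toList ≠ none := by
        intro hn
        exact h1 ((PySem.Dict.get?_eq_none_iff_contains _ _).1 hn)
      obtain ⟨v, hv⟩ := Option.ne_none_iff_exists'.1 hsome
      rw [if_neg h1]
      simp only [pvG, hv, Option.getD_some]
      by_cases hp : (v == "placeholder") = true <;>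
        by_cases he : (v == "enhanced") = true <;>
          simp [hp, he]
  rw [hstep]
  rw [PySem.Dict.items_foldl_insert_fresh l (fun p => p.1) (fun p => pvG ex p.1)
    PySem.Dict.empty (fun p _ => rfl) h]
  rfl

-- Option.map through the classification agreement
theorem pvMap_classify (x : Option (List Char)) :
    x.map pvClassifyB = x.map pvClassify := by
  cases x <;> simp [pvClassifyB_eq]

-- ===== VERDICT (by name: the statement is the Claim_ definition above) =====
theorem identify_modules_needing_enhancement_spec : Claim_equal_identify_modules_needing_enhancement := by
  intro ec ai _
  unfold Spec_identify_modules_needing_enhancement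
  unfold identify_modules_needing_enhancement identify_modules_needing_enhancement_alt
  dsimp only
  rw [List.foldl_reverse]
  have hnd : (((PySem.Dict.ofList ai).items).map Prod.fst).Nodup := PySem.Dict.nodup_keys_ofList ai
  rw [pvStatus_eq _ _ hnd]
  have hk : (PySem.Dict.ofList ai).keys = (PySem.Dict.ofList ai).items.map Prod.fst := rfl
  rw [hk, List.map_map]
  refine List.map_congr_left fun p _ => ?_
  simp only [Function.comp_apply, Prod.mk.injEq]
  refine ⟨trivial, ?_⟩
  set lines := PySem.Chars.splitOn ec.toList ['\n'] with hlines
  obtain ⟨hB1, _⟩ := pvB_fold lines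
  -- the two existing-enhancement lookups agree on every key
  have hAB : (if ec.toList = [] then (PySem.Dict.empty : PySem.Dict (List Char) String)
      else
        (pvFlushA (lines.foldl pvStepA (PySem.Dict.empty, none, [])).1
            (lines.foldl pvStepA (PySem.Dict.empty, none, [])).2.1
            (lines.foldl pvStepA (PySem.Dict.empty, none, [])).2.2).items.foldl
          (fun d q => d.insert q.1 (pvClassify q.2)) PySem.Dict.empty).get? p.1.toList
      = ((lines.foldr (fun l st => pvStepBr st l)
          ((PySem.Dict.empty : PySem.Dict (List Char) String), ([] : List (List Char)))).1).get? p.1.toList := by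
    rw [hB1 p.1.toList, pvMap_classify]
    by_cases hec : ec.toList = []
    · rw [if_pos hec]
      have hsecs : pvSecs lines none = [] := by rw [hlines, hec]; rfl
      rw [hsecs]
      rfl
    · rw [if_neg hec]
      have hS := pvA_fold lines PySem.Dict.empty none [] (fun s hs => by cases hs)
      rw [hS]
      simp only [Option.map_none]
      set L := pvSecs lines none with hL
      set S := L.foldl (fun dd q => dd.insert q.1 q.2) PySem.Dict.empty with hSdef
      have hnodS : ((S.items).map Prod.fst).Nodup :=
        PySem.Dict.nodup_keys_foldl_insert_key L (fun q => q.1) (fun _ q => q.2)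
          PySem.Dict.empty PySem.Dict.nodup_keys_empty
      have hitems : (S.items.foldl (fun d q => d.insert q.1 (pvClassify q.2)) PySem.Dict.empty).items
          = S.items.map (fun q => (q.1, pvClassify q.2)) :=
        PySem.Dict.items_foldl_insert_fresh S.items (fun q => q.1) (fun q => pvClassify q.2)
          PySem.Dict.empty (fun q _ => rfl) hnodS
      have hdict : S.items.foldl (fun d q => d.insert q.1 (pvClassify q.2)) PySem.Dict.empty
          = PySem.Dict.mk (S.items.map (fun q => (q.1, pvClassify q.2))) :=
        PySem.Dict.ext hitems
      rw [hdict, pvGet_mk_map]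
      have hSmk : PySem.Dict.mk S.items = S := rfl
      rw [hSmk, hSdef, pvGet_foldl_insert]
      have hemp : (PySem.Dict.empty : PySem.Dict (List Char) (List Char)).get? p.1.toList = none := rfl
      rw [hemp, Option.or_none]
  rw [pvG, hAB]
  cases h : ((lines.foldr (fun l st => pvStepBr st l)
      ((PySem.Dict.empty : PySem.Dict (List Char) String), ([] : List (List Char)))).1).get? p.1.toList with
  | none => rfl
  | some st => exact (pvStatusTable_get st).symm
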